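-- pv_equiv track=rewrite | github.com/lfusca/lancamento_de_nota | main.py | _to_bind
-- ===== SOURCE A (Python) =====
-- def _to_bind(sql: str) -> str:
--     """Converte '?' para ':1, :2…' para usar os mesmos placeholders do SQLite."""
--     if "?" not in sql:
--         return sql
--     parts = sql.split("?")
--     out = parts[0]
--     for i in range(1, len(parts)):
--         out += f":{i}" + parts[i]
--     return out
-- ===== SOURCE B (Python) =====
-- def _to_bind(sql: str) -> str:
--     """Converte '?' para ':1, :2…' para usar os mesmos placeholders do SQLite."""
--     out = []
--     n = 1
--     for ch in sql:
--         if ch == "?":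
--             out.append(f":{n}")
--             n += 1
--         else:
--             out.append(ch)
--     return "".join(out)
-- ===== Notes on version B (the rewrite author's own statement) =====
-- stated objective: simpler
-- what changed: Replaced split-on-'?'-and-rebuild (segment list plus indexed loop with string concatenation and a membership guard) by a single character scan with a counter and an output buffer joined once at the end; the no-'?' special case disappears.
import Mathlib
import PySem

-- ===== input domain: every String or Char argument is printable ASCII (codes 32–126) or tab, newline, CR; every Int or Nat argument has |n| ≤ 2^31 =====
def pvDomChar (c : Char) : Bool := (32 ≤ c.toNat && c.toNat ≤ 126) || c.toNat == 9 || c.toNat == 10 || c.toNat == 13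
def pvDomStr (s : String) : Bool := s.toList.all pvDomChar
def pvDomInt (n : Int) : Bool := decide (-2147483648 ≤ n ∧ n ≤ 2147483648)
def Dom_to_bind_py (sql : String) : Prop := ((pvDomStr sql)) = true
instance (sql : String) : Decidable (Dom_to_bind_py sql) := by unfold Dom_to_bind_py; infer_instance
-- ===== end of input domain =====

-- B replaces A's split-on-'?'-and-rebuild by a single character scan with a counter; return value only, no mutation.

-- ===== PORT A =====
-- Literal port of A: guard "?" not in sql; parts = sql.split("?"); out = parts[0];
-- for i in range(1, len(parts)): out += f":{i}" + parts[i].  Strings handled as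
-- List Char via .toList / String.ofList (PySem's Str primitives are wrappers over Chars).
-- parts[0] / parts[i] are always in range (split returns a nonempty list), so getD/headD default is never taken.
def to_bind_py (sql : String) : String :=
  if PySem.Str.isIn "?" sql = false then sql
  else
    let parts := PySem.Chars.splitOn sql.toList "?".toList
    let out := parts.headD []
    String.ofList <|
      (PySem.List.pyRange 1 (parts.length : Int) 1).foldl
        (fun out i =>
          out ++ (':' :: (PySem.Int.toStr i).toList) ++ (PySem.List.pyGet? parts i).getD [])
        out

-- ===== PORT B =====
-- Literal port of B: scan the characters, keeping the counter n and the buffer of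
-- appended pieces (out.append(...)); finally "".join = flatten.
def toBindAltLoop (n : Int) (acc : List (List Char)) : List Char → List (List Char)
  | [] => acc
  | c :: rest =>
      if c = '?' then toBindAltLoop (n + 1) (acc ++ [':' :: (PySem.Int.toStr n).toList]) rest
      else toBindAltLoop n (acc ++ [[c]]) rest

def to_bind_py_alt (sql : String) : String :=
  String.ofList (toBindAltLoop 1 [] sql.toList).flatten

-- ===== PRECONDITION & SPEC =====
def Spec_to_bind_py (sql : String) (out : String) : Prop := out = to_bind_py_alt sql
instance (sql : String) (out : String) : Decidable (Spec_to_bind_py sql out) := by unfold Spec_to_bind_py; infer_instance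

-- ===== CLAIM (what is proved, stated in full; the proofs are below) =====
def Claim_equal_to_bind_py : Prop := ∀ (sql : String), Dom_to_bind_py sql → Spec_to_bind_py sql (to_bind_py sql)

-- ===== LEMMAS AND PROOFS =====

-- The common specification: replace the k-th '?' (1-based) by ":k".
def tbSpec (n : Int) : List Char → List Char
  | [] => []
  | c :: rest =>
      if c = '?' then ':' :: (PySem.Int.toStr n).toList ++ tbSpec (n + 1) rest
      else c :: tbSpec n rest

-- Structural form of splitOn on the single-character separator '?'.
def mySplit (cur : List Char) : List Char → List (List Char)
  | [] => [cur.reverse]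
  | c :: rest => if c = '?' then cur.reverse :: mySplit [] rest else mySplit (c :: cur) rest

def tbGlue (n : Int) : List (List Char) → List Char
  | [] => []
  | p :: ps => (':' :: (PySem.Int.toStr n).toList) ++ p ++ tbGlue (n + 1) ps

lemma mySplit_ne_nil (cur : List Char) (l : List Char) : mySplit cur l ≠ [] := by
  induction l generalizing cur with
  | nil => simp [mySplit]
  | cons c rest ih =>
      simp only [mySplit]
      split_ifs
      · simp
      · exact ih _

lemma splitOn_go_eq (fuel : Nat) (l cur : List Char) (acc : List (List Char))
    (h : l.length < fuel) :
    PySem.Chars.splitOn.go "?".toList fuel l cur acc = acc.reverse ++ mySplit cur l := by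
  induction fuel generalizing l cur acc with
  | zero => omega
  | succ fuel ih =>
      cases l with
      | nil => simp [PySem.Chars.splitOn.go, mySplit]
      | cons c rest =>
          by_cases hc : c = '?'
          · subst hc
            have hp : List.isPrefixOf "?".toList ('?' :: rest) = true := by
              simp [List.isPrefixOf]
            simp only [PySem.Chars.splitOn.go, hp, if_pos]
            rw [ih _ _ _ (by simp at h ⊢; omega)]
            simp [mySplit, List.append_assoc]
          · have hp : List.isPrefixOf "?".toList (c :: rest) = false := by
              simp [List.isPrefixOf]
              exact fun hq => absurd hq.symm hc
            simp only [PySem.Chars.splitOn.go, hp, Bool.false_eq_true, if_false]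
            rw [ih _ _ _ (by simp at h ⊢; omega)]
            simp [mySplit, if_neg hc]

lemma splitOn_eq (l : List Char) :
    PySem.Chars.splitOn l "?".toList = mySplit [] l := by
  have := splitOn_go_eq (l.length + 1) l [] [] (by omega)
  simpa [PySem.Chars.splitOn] using this

-- glue over head/tail of mySplit reconstructs tbSpec
lemma mySplit_glue (l : List Char) (cur : List Char) (n : Int) :
    (mySplit cur l).headD [] ++ tbGlue n ((mySplit cur l).tail) = cur.reverse ++ tbSpec n l := by
  induction l generalizing cur n with
  | nil => simp [mySplit, tbGlue, tbSpec]
  | cons c rest ih =>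
      by_cases hc : c = '?'
      · subst hc
        simp only [mySplit, tbSpec, if_true]
        obtain ⟨p, ps, hps⟩ : ∃ p ps, mySplit ([] : List Char) rest = p :: ps := by
          cases hsp : mySplit ([] : List Char) rest with
          | nil => exact absurd hsp (mySplit_ne_nil _ _)
          | cons p ps => exact ⟨p, ps, rfl⟩
        have h2 := ih ([] : List Char) (n + 1)
        rw [hps] at h2 ⊢
        simp only [List.reverse_nil, List.nil_append, List.headD_cons, List.tail_cons] at h2
        simp only [List.headD_cons, List.tail_cons]
        rw [show tbGlue n (p :: ps) = (':' :: (PySem.Int.toStr n).toList) ++ (p ++ tbGlue (n + 1) ps) by simp [tbGlue], h2]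
      · simp only [mySplit, tbSpec, if_neg hc]
        have := ih (c :: cur) n
        simpa using this

-- the pyRange fold is tbGlue on the dropped suffix
lemma fold_range (parts : List (List Char)) (k : Nat) :
    ∀ (j : Nat) (pref : List Char), parts.length - j = k → 
    (PySem.List.pyRange (j : Int) (parts.length : Int) 1).foldl
      (fun out i => out ++ (':' :: (PySem.Int.toStr i).toList) ++ (PySem.List.pyGet? parts i).getD [])
      pref = pref ++ tbGlue (j : Int) (parts.drop j) := by
  induction k with
  | zero =>
      intro j pref hj
      have hle : parts.length ≤ j := by omega
      have : PySem.List.pyRange (j : Int) (parts.length : Int) 1 = [] := by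
        simp [PySem.List.pyRange]; omega
      simp [this, List.drop_eq_nil_of_le hle, tbGlue]
  | succ k ih =>
      intro j pref hj
      have hlt : j < parts.length := by omega
      rw [PySem.List.pyRange_one_cons (by exact_mod_cast hlt)]
      simp only [List.foldl_cons]
      have hget : PySem.List.pyGet? parts (j : Int) = some parts[j] := by
        rw [PySem.List.pyGet?_natCast]
        simp [List.getElem?_eq_getElem hlt]
      have hdrop : parts.drop j = parts[j] :: parts.drop (j + 1) :=
        List.drop_eq_getElem_cons hlt
      have hcast : ((j : Int) + 1) = ((j + 1 : Nat) : Int) := by push_cast; ring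
      rw [hget, hcast, ih (j + 1) _ (by omega), hdrop]
      simp [tbGlue, List.append_assoc]

-- B's loop computes tbSpec
lemma altLoop_eq (l : List Char) (n : Int) (acc : List (List Char)) :
    (toBindAltLoop n acc l).flatten = acc.flatten ++ tbSpec n l := by
  induction l generalizing n acc with
  | nil => simp [toBindAltLoop, tbSpec]
  | cons c rest ih =>
      by_cases hc : c = '?'
      · subst hc
        simp [toBindAltLoop, tbSpec, ih, List.append_assoc]
      · simp [toBindAltLoop, tbSpec, if_neg hc, ih, List.append_assoc]

lemma tbSpec_no_q (l : List Char) (h : '?' ∉ l) (n : Int) : tbSpec n l = l := by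
  induction l generalizing n with
  | nil => rfl
  | cons c rest ih =>
      simp only [List.mem_cons, not_or] at h
      simp [tbSpec, if_neg (fun hc : c = '?' => h.1 hc.symm), ih h.2]

-- ===== VERDICT (by name: the statement is the Claim_ definition above) =====
theorem to_bind_py_spec : Claim_equal_to_bind_py := by
  intro sql _
  unfold Spec_to_bind_py to_bind_py to_bind_py_alt
  rw [altLoop_eq]
  by_cases h : PySem.Str.isIn "?" sql = false
  · rw [if_pos h]
    have hmem : '?' ∉ sql.toList := by
      rw [PySem.Str.isIn_eq, PySem.Chars.isIn_eq_false_iff] at h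
      intro hm
      obtain ⟨s, t, hx⟩ := List.append_of_mem hm
      exact h ⟨s, t, by rw [hx]; simp⟩
    rw [tbSpec_no_q _ hmem]
    simp
  · rw [if_neg h]
    simp only [splitOn_eq, List.flatten_nil, List.nil_append]
    have h1 := fold_range (mySplit [] sql.toList) ((mySplit [] sql.toList).length - 1) 1
      ((mySplit [] sql.toList).headD []) (by omega)
    simp only [Nat.cast_one] at h1
    rw [h1, List.drop_one]
    have h2 := mySplit_glue sql.toList [] 1
    simp only [List.reverse_nil, List.nil_append] at h2
    rw [h2]
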